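-- pv_equiv track=rewrite | github.com/astranero/tira2 | viikko2/biterase.py | hajotus
-- ===== SOURCE A (Python) =====
-- def hajotus(s, cache, indeksi=0):
--     if s in cache:
--         return cache[s]
--     if len(s) == 0 or len(s) == 1:
--         return 0
--     set = ["11", "00"]
--     if s in set:
--         return 1
--     if indeksi >= len(s)-1:
--         return 0
--
--     maarat = 0
--     maarat += hajotus(s, cache, indeksi+1)
--     if s[indeksi] == s[indeksi+1]:
--         maarat += hajotus(s[0:indeksi]+s[indeksi+2:len(s)], cache, 0)
--     cache[s] = maarat
--     return maarat
-- ===== SOURCE B (Python) =====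
-- def hajotus(s, cache, indeksi=0):
--     if s in cache:
--         return cache[s]
--     if len(s) <= 1:
--         return 0
--     if s in ("11", "00"):
--         return 1
--     if indeksi >= len(s) - 1:
--         return 0
--     total = _scan(cache, s[:indeksi], s[indeksi:])
--     cache[s] = total
--     return total
--
--
-- def _scan(cache, prefix, suffix):
--     if len(suffix) < 2:
--         return 0
--     total = _scan(cache, prefix + suffix[0], suffix[1:])
--     if suffix[0] == suffix[1]:
--         total += hajotus(prefix + suffix[2:], cache)
--     return total
-- ===== Notes on version B (the rewrite author's own statement) =====
-- stated objective: alternative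
-- what changed: A threads an integer index through a tail recursion that re-checks the cache and every base case at each position; B keeps the memoized outer function but sums the pair contributions by a structural recursion over a (prefix, suffix) split of the string, peeling one character per step, so no index arithmetic or per-position re-checks remain.
-- outside the precondition, e.g. on hajotus('aa', {'': 1}, -2): A returns 4, B returns 1; on hajotus('0011', {}, -1): A returns 2, B returns 0
import Mathlib
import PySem

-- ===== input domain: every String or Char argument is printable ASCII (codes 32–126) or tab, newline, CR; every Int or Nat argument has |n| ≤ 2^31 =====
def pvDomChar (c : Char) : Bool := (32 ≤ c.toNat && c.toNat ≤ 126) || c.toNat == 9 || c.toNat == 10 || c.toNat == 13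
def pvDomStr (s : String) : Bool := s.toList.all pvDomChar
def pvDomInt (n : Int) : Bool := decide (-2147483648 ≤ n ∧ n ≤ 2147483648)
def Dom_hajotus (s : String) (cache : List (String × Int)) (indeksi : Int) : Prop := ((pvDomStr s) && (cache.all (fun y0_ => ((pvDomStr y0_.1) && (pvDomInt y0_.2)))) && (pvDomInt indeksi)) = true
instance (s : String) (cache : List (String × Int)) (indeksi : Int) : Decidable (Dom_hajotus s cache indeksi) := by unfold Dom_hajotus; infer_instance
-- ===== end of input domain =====

-- B keeps the memoized outer recursion but replaces A's index-threading tail recursion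
-- (which re-checks the cache and all base cases at every index) with a structural
-- recursion over a (prefix, suffix) split of the string: a different decomposition.
-- Both ports carry a fuel argument as a totality guard only (each wrapper passes fuel
-- exceeding the recursion depth; the proofs show it is never exhausted).
-- Both Pythons mutate `cache` in place; the equivalence proved here is about the RETURN
-- value only (the two final caches hold the same keys and values, in different order).

-- cache marshalling shared by both ports (Python dict with str keys → Dict over List Char)
def mkCache (cache : List (String × Int)) : PySem.Dict (List Char) Int :=
  PySem.Dict.ofList (cache.map (fun p => (p.1.toList, p.2)))

-- ===== PORT A =====
-- fuel bound for A's recursion (an upper bound on the measure of any reachable call)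
def muA (L : Nat) (i : Int) : Nat :=
  if i < 0 then 4 * (L * L) + (-i).toNat else L * L + ((L : Int) - 1 - i).toNat

-- A: tail recursion on indeksi; every level re-checks cache/bases, then adds the
-- contribution of its own index and stores the running total under s.
def hajACore : Nat → List Char → PySem.Dict (List Char) Int → Int →
    Int × PySem.Dict (List Char) Int
  | 0, _, c, _ => (0, c)
  | Nat.succ fuel, s, c, i =>
    match c.get? s with
    | some v => (v, c)
    | none =>
      if s.length = 0 ∨ s.length = 1 then (0, c)
      else if s = "11".toList ∨ s = "00".toList then (1, c)
      else if (s.length : Int) - 1 ≤ i then (0, c)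
      else
        let r1 := hajACore fuel s c (i + 1)
        let r2 :=
          if PySem.List.pyGetD s i ' ' = PySem.List.pyGetD s (i + 1) ' ' then
            hajACore fuel (PySem.List.slice s (some 0) (some i) ++
                      PySem.List.slice s (some (i + 2)) (some (s.length : Int))) r1.2 0
          else (0, r1.2)
        (r1.1 + r2.1, (r2.2).insert s (r1.1 + r2.1))

def hajotus (s : String) (cache : List (String × Int)) (indeksi : Int) : Int :=
  (hajACore (muA s.toList.length indeksi + 1) s.toList (mkCache cache) indeksi).1

-- ===== PORT B =====
mutual
-- B: check the cache and the base cases once, then hand the (prefix, suffix) split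
-- at indeksi to a structural scan that peels one character per step.
def hajBCore : Nat → List Char → PySem.Dict (List Char) Int → Int →
    Int × PySem.Dict (List Char) Int
  | 0, _, c, _ => (0, c)
  | Nat.succ fuel, s, c, i =>
    match c.get? s with
    | some v => (v, c)
    | none =>
      if s.length ≤ 1 then (0, c)
      else if s = "11".toList ∨ s = "00".toList then (1, c)
      else if (s.length : Int) - 1 ≤ i then (0, c)
      else
        let r := scanB fuel (PySem.List.slice s none (some i)) (PySem.List.slice s (some i) none) c
        (r.1, (r.2).insert s r.1)

-- _scan: walk the suffix; whenever its first two characters agree, recurse on the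
-- string with that pair removed (prefix ++ rest), threading the cache through.
def scanB : Nat → List Char → List Char → PySem.Dict (List Char) Int →
    Int × PySem.Dict (List Char) Int
  | 0, _, _, c => (0, c)
  | Nat.succ fuel, pre, suf, c =>
    match suf with
    | [] => (0, c)
    | [_] => (0, c)
    | a :: b :: rest =>
      let r := scanB fuel (pre ++ [a]) (b :: rest) c
      if a = b then
        let r2 := hajBCore fuel (pre ++ rest) r.2 0
        (r.1 + r2.1, r2.2)
      else r
end

def hajotus_alt (s : String) (cache : List (String × Int)) (indeksi : Int) : Int :=
  (hajBCore (s.toList.length * (s.toList.length + 2) + s.toList.length + 2)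
    s.toList (mkCache cache) indeksi).1

-- ===== PRECONDITION & SPEC =====
-- Pre_ excludes calls whose indeksi is negative and that reach the recursive part: there A
-- either raises an IndexError (indeksi < -len(s)) or, through Python's negative-index
-- wraparound, returns a value that depends on the order in which its memo cache happens to
-- be updated — an accidental corner of the internal recursion parameter that no caller of
-- this function specifies (B, scanning from its own slice split, returns its own such value).
def Pre_hajotus (s : String) (cache : List (String × Int)) (indeksi : Int) : Prop :=
  0 ≤ indeksi ∨ s.toList.length ≤ 1 ∨ s = "11" ∨ s = "00" ∨ s ∈ cache.map Prod.fst

instance (s : String) (cache : List (String × Int)) (indeksi : Int) :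
    Decidable (Pre_hajotus s cache indeksi) := by unfold Pre_hajotus; infer_instance

def pvWitness_hajotus : String × (List (String × Int)) × Int := ("1100", [("10", 3)], 0)

def Spec_hajotus (s : String) (cache : List (String × Int)) (indeksi : Int) (out : Int) : Prop := out = hajotus_alt s cache indeksi
instance (s : String) (cache : List (String × Int)) (indeksi : Int) (out : Int) : Decidable (Spec_hajotus s cache indeksi out) := by unfold Spec_hajotus; infer_instance

-- ===== CLAIM (what is proved, stated in full; the proofs are below) =====
def Claim_equal_hajotus : Prop := ∀ (s : String) (cache : List (String × Int)) (indeksi : Int), Dom_hajotus s cache indeksi → Pre_hajotus s cache indeksi → Spec_hajotus s cache indeksi (hajotus s cache indeksi)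

-- ===== LEMMAS AND PROOFS =====

theorem pvClampIdx_char (n : Nat) (k : Int) :
    PySem.List.clampIdx n k = if 0 ≤ k then min k.toNat n else n - (-k).toNat := by
  by_cases h : 0 ≤ k
  · rw [if_pos h, show k = ((k.toNat : Nat) : Int) by omega, PySem.List.clampIdx_natCast]
    omega
  · rw [if_neg h, show k = -(((-k).toNat : Nat) : Int) by omega,
        PySem.List.clampIdx_neg_natCast _ _ (by omega)]
    omega

theorem pvDecA_tail (L : Nat) (i : Int) (h1 : ¬ (L = 0 ∨ L = 1)) (h3 : ¬ ((L : Int) - 1 ≤ i)) :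
    muA L (i + 1) < muA L i := by
  unfold muA
  have hLL : L ≤ L * L := Nat.le_mul_of_pos_left L (by omega)
  by_cases hneg : i < 0 <;> by_cases hneg1 : i + 1 < 0 <;>
    simp only [hneg, hneg1, if_true, if_false] <;> omega

theorem pvDecA_cut (L m : Nat) (i : Int) (hL : 2 ≤ L)
    (hm : (i < 0 → m ≤ 2 * L - 2) ∧ (0 ≤ i → m = L - 2)) (h3 : ¬ ((L : Int) - 1 ≤ i)) :
    muA m 0 < muA L i := by
  unfold muA
  obtain ⟨b, rfl⟩ : ∃ b, L = b + 2 := ⟨L - 2, by omega⟩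
  by_cases hneg : i < 0 <;> simp only [hneg, if_true, if_false] <;>
    simp only [show ¬ ((0:Int) < 0) by omega, if_false]
  · have hm' : m ≤ 2 * b + 2 := by have := hm.1 hneg; omega
    have h1 : m * m ≤ (2 * b + 2) * (2 * b + 2) := Nat.mul_le_mul hm' hm'
    have e1 : ((m:Int) - 1 - 0).toNat = m - 1 := by omega
    have e2 : 1 ≤ (-i).toNat := by omega
    rw [e1]
    nlinarith [h1, e2, hm', Nat.sub_le m 1]
  · have hm' : m = b := by have := hm.2 (by omega); omega
    subst hm'
    have e1 : ((m:Int) - 1 - 0).toNat = m - 1 := by omega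
    have e2 : 1 ≤ (((m:Nat) + 2 : Int) - 1 - i).toNat := by omega
    rw [e1]
    nlinarith [e2, Nat.sub_le m 1]

-- s[:i] and s[i:] partition s, for any Int i
theorem pvLenSplit (s : List Char) (i : Int) :
    (PySem.List.slice s none (some i)).length + (PySem.List.slice s (some i) none).length
      = s.length := by
  rw [← PySem.List.slice_zero_start, PySem.List.length_slice, PySem.List.slice_some_none,
      List.length_drop, pvClampIdx_char, pvClampIdx_char]
  split_ifs <;> omega

-- decrease facts for port B's fuel accounting
theorem pvDecB_enter (s : List Char) (i : Int) :
    ((PySem.List.slice s none (some i)).length + (PySem.List.slice s (some i) none).length) *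
        ((PySem.List.slice s none (some i)).length + (PySem.List.slice s (some i) none).length + 2) +
        (PySem.List.slice s (some i) none).length
      < s.length * (s.length + 2) + s.length + 1 := by
  have h := pvLenSplit s i
  have hb : (PySem.List.slice s (some i) none).length ≤ s.length := by omega
  rw [h]
  generalize s.length * (s.length + 2) = K
  omega

theorem pvDecB_scan (pre : List Char) (a b : Char) (rest : List Char) :
    ((pre ++ [a]).length + (b :: rest).length) * ((pre ++ [a]).length + (b :: rest).length + 2)
        + (b :: rest).length
      < (pre.length + (a :: b :: rest).length) * (pre.length + (a :: b :: rest).length + 2)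
        + (a :: b :: rest).length := by
  have e : (pre ++ [a]).length + (b :: rest).length = pre.length + (a :: b :: rest).length := by
    simp only [List.length_append, List.length_cons, List.length_nil]
    omega
  rw [e]
  exact Nat.add_lt_add_left (by simp only [List.length_cons]; omega) _

theorem pvDecB_cut (pre : List Char) (a b : Char) (rest : List Char) :
    (pre ++ rest).length * ((pre ++ rest).length + 2) + (pre ++ rest).length + 1
      < (pre.length + (a :: b :: rest).length) * (pre.length + (a :: b :: rest).length + 2)
        + (a :: b :: rest).length := by
  simp only [List.length_append, List.length_cons]
  have e : pre.length + (rest.length + 1 + 1) = pre.length + rest.length + 2 := by omega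
  rw [e]
  generalize pre.length + rest.length = q
  nlinarith

-- the string with the adjacent pair at j removed
def remS (s : List Char) (j : Nat) : List Char := s.take j ++ s.drop (j + 2)

theorem length_remS (s : List Char) (j : Nat) (h : j + 1 < s.length) :
    (remS s j).length = s.length - 2 := by
  simp [remS]; omega

-- the pure value both programs compute, relative to a fixed cache c:
-- Fcore c s none      = memo-respecting count for s            ("F")
-- Fcore c s (some j)  = Σ_{j ≤ j' < len-1, s[j']=s[j'+1]} F of the reduced string  ("G")
def Fcore (c : PySem.Dict (List Char) Int) (s : List Char) (j? : Option Nat) : Int :=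
  match j? with
  | none =>
    match c.get? s with
    | some v => v
    | none =>
      if s.length ≤ 1 then 0
      else if s = "11".toList ∨ s = "00".toList then 1
      else Fcore c s (some 0)
  | some j =>
    if h : j + 1 < s.length then
      (if s.getD j ' ' = s.getD (j + 1) ' ' then Fcore c (remS s j) none else 0)
        + Fcore c s (some (j + 1))
    else 0
termination_by (s.length * s.length + (match j? with | none => s.length | some j => s.length - 1 - j))
decreasing_by
  · simp; omega
  · have hL := length_remS s j (by omega)
    simp [hL]
    obtain ⟨a, ha⟩ : ∃ a, s.length = a + 2 := ⟨s.length - 2, by omega⟩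
    rw [ha]
    simp
    nlinarith []
  · simp; omega

def Fv (c : PySem.Dict (List Char) Int) (s : List Char) : Int := Fcore c s none
def Gv (c : PySem.Dict (List Char) Int) (s : List Char) (j : Nat) : Int := Fcore c s (some j)

-- what A returns from a call (s, c, i) that does not raise (0 ≤ i)
def Aval (c : PySem.Dict (List Char) Int) (s : List Char) (i : Int) : Int :=
  match c.get? s with
  | some v => v
  | none =>
    if s.length ≤ 1 then 0
    else if s = "11".toList ∨ s = "00".toList then 1
    else if (s.length : Int) - 1 ≤ i then 0
    else Gv c s i.toNat

-- c' extends c by entries that are Fv-correct relative to c, for strings of length ≤ n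
def pvExt (c c' : PySem.Dict (List Char) Int) (n : Nat) : Prop :=
  ∀ u : List Char, u.length ≤ n →
    (c'.get? u = c.get? u ∨ (c.get? u = none ∧ c'.get? u = some (Fv c u)))

-- same, for strings of any length, with the length bound folded into the disjunct
def pvExtAll (c c' : PySem.Dict (List Char) Int) (n : Nat) : Prop :=
  ∀ u : List Char,
    c'.get? u = c.get? u ∨ (u.length ≤ n ∧ c.get? u = none ∧ c'.get? u = some (Fv c u))

-- same, except at one string e (whose cached value A overwrites repeatedly)
def pvExtX (c c' : PySem.Dict (List Char) Int) (n : Nat) (e : List Char) : Prop :=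
  ∀ u : List Char, u ≠ e →
    (c'.get? u = c.get? u ∨ (u.length ≤ n ∧ c.get? u = none ∧ c'.get? u = some (Fv c u)))

theorem G_stop (c : PySem.Dict (List Char) Int) (s : List Char) (j : Nat)
    (h : ¬ j + 1 < s.length) : Gv c s j = 0 := by
  unfold Gv; rw [Fcore, dif_neg h]

theorem G_step (c : PySem.Dict (List Char) Int) (s : List Char) (j : Nat)
    (h : j + 1 < s.length) :
    Gv c s j = (if s.getD j ' ' = s.getD (j + 1) ' ' then Fv c (remS s j) else 0)
        + Gv c s (j + 1) := by
  unfold Gv Fv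
  conv_lhs => rw [Fcore]
  rw [dif_pos h]

theorem Aval_zero (c : PySem.Dict (List Char) Int) (s : List Char) :
    Aval c s 0 = Fv c s := by
  unfold Aval Fv
  rw [Fcore]
  rcases hg : c.get? s with _ | v <;> simp only [hg]
  split_ifs with h1 h2 h3
  · rfl
  · rfl
  · exact absurd h3 (by omega)
  · rfl

theorem Fv_of_get (c : PySem.Dict (List Char) Int) (s : List Char) (v : Int)
    (hg : c.get? s = some v) : Fv c s = v := by
  unfold Fv; rw [Fcore]; simp [hg]

theorem Fv_of_short (c : PySem.Dict (List Char) Int) (s : List Char)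
    (hg : c.get? s = none) (h1 : s.length ≤ 1) : Fv c s = 0 := by
  unfold Fv; rw [Fcore]; simp [hg, h1]

theorem Fv_of_pair (c : PySem.Dict (List Char) Int) (s : List Char)
    (hg : c.get? s = none) (h1 : ¬ s.length ≤ 1)
    (h2 : s = "11".toList ∨ s = "00".toList) : Fv c s = 1 := by
  unfold Fv; rw [Fcore]
  rcases h2 with h | h <;> subst h <;> simp_all

theorem Fv_compute (c : PySem.Dict (List Char) Int) (s : List Char)
    (hg : c.get? s = none) (h1 : ¬ s.length ≤ 1)
    (h2 : ¬ (s = "11".toList ∨ s = "00".toList)) : Fv c s = Gv c s 0 := by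
  have h2' : ¬ (s = ['1','1'] ∨ s = ['0','0']) := by simpa using h2
  unfold Fv Gv; rw [Fcore]; simp [hg, h1, h2']

theorem Fcore_stable (c c' : PySem.Dict (List Char) Int) (n : Nat)
    (hE : pvExt c c' n) :
    ∀ (s : List Char) (j? : Option Nat),
      (match j? with | none => s.length ≤ n | some _ => s.length ≤ n + 2) →
      Fcore c' s j? = Fcore c s j? := by
  intro s j?
  induction s, j? using Fcore.induct (c := c) with
  | case1 s v hg =>
    intro hn
    show Fv c' s = Fv c s
    rcases hE s hn with hc | ⟨hnone, _⟩
    · rw [Fv_of_get c' s v (hc.trans hg), Fv_of_get c s v hg]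
    · rw [hnone] at hg; exact absurd hg (by simp)
  | case2 s hg h1 =>
    intro hn
    show Fv c' s = Fv c s
    rcases hE s hn with hc | ⟨_, hsome⟩
    · rw [Fv_of_short c' s (hc.trans hg) h1, Fv_of_short c s hg h1]
    · rw [Fv_of_get c' s _ hsome]
  | case3 s hg h1 h2 =>
    intro hn
    show Fv c' s = Fv c s
    rcases hE s hn with hc | ⟨_, hsome⟩
    · rw [Fv_of_pair c' s (hc.trans hg) h1 h2, Fv_of_pair c s hg h1 h2]
    · rw [Fv_of_get c' s _ hsome]
  | case4 s hg h1 h2 ih1 =>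
    intro hn
    show Fv c' s = Fv c s
    rcases hE s hn with hc | ⟨_, hsome⟩
    · rw [Fv_compute c' s (hc.trans hg) h1 h2, Fv_compute c s hg h1 h2]
      exact ih1 (by simpa using Nat.le_succ_of_le (Nat.le_succ_of_le hn))
    · rw [Fv_of_get c' s _ hsome]
  | case5 s j h ih2 ih1 =>
    intro hn
    show Gv c' s j = Gv c s j
    rw [G_step c' s j h, G_step c s j h]
    have hrem : (remS s j).length ≤ n := by
      rw [length_remS s j h]; omega
    have h2 := ih2 (by simpa using hrem)
    have h1 := ih1 (by simpa using hn)
    show (if _ then Fv c' (remS s j) else 0) + Gv c' s (j+1) = _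
    rw [show Fv c' (remS s j) = Fv c (remS s j) from h2,
        show Gv c' s (j+1) = Gv c s (j+1) from h1]
  | case6 s j h =>
    intro _
    show Gv c' s j = Gv c s j
    rw [G_stop c' s j h, G_stop c s j h]

theorem cutA_eq (s : List Char) (i : Int) (h0 : 0 ≤ i) (h1 : i < (s.length : Int) - 1) :
    PySem.List.slice s (some 0) (some i) ++ PySem.List.slice s (some (i + 2)) (some (s.length : Int))
      = remS s i.toNat := by
  rw [PySem.List.slice_zero_start, PySem.List.slice_to s h0,
      PySem.List.slice_toNat s (by omega) (by omega)]
  unfold remS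
  rw [show (i + 2).toNat = i.toNat + 2 by omega]
  congr 1
  exact List.take_of_length_le (by simp)

theorem pyGetD_toNat (s : List Char) (i : Int) (d : Char) (h0 : 0 ≤ i) :
    PySem.List.pyGetD s i d = s.getD i.toNat d := by
  conv_lhs => rw [show i = ((i.toNat : Nat) : Int) by omega]
  rw [PySem.List.pyGetD_natCast]

theorem pvExt_of_pvExtX (c c' : PySem.Dict (List Char) Int) (n : Nat) (e : List Char)
    (h : pvExtX c c' n e) (hn : n < e.length) : pvExt c c' n := by
  intro u hu
  rcases h u (by intro he; subst he; omega) with hc | ⟨_, h2, h3⟩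
  · exact Or.inl hc
  · exact Or.inr ⟨h2, h3⟩

theorem comp_step (c c1 c2 : PySem.Dict (List Char) Int) (s cut : List Char)
    (hlen : cut.length + 2 = s.length)
    (hX1 : pvExtX c c1 (s.length - 2) s)
    (hX2 : pvExtX c1 c2 (cut.length - 2) cut)
    (hcut : c2.get? cut = c1.get? cut ∨ (c1.get? cut = none ∧ c2.get? cut = some (Fv c1 cut)))
    (hE : pvExt c c1 (s.length - 2)) :
    pvExtX c c2 (s.length - 2) s := by
  intro u hus
  have hstable : ∀ w : List Char, w.length ≤ s.length - 2 → Fv c1 w = Fv c w := by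
    intro w hw
    exact Fcore_stable c c1 (s.length - 2) hE w none (by simpa using hw)
  by_cases hu : u = cut
  · subst hu
    rcases hcut with hc | ⟨hn1, hs2⟩
    · rcases hX1 u hus with hc1 | ⟨hb, hn, hs⟩
      · exact Or.inl (hc.trans hc1)
      · exact Or.inr ⟨hb, hn, hc.trans hs⟩
    · rcases hX1 u hus with hc1 | ⟨_, _, hs⟩
      · refine Or.inr ⟨by omega, hn1 ▸ hc1.symm, ?_⟩
        rw [hs2, hstable u (by omega)]
      · rw [hn1] at hs; exact absurd hs (by simp)
  · rcases hX2 u hu with hc | ⟨hb, hn1, hs2⟩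
    · rcases hX1 u hus with hc1 | ⟨hb, hn, hs⟩
      · exact Or.inl (hc.trans hc1)
      · exact Or.inr ⟨hb, hn, hc.trans hs⟩
    · rcases hX1 u hus with hc1 | ⟨_, _, hs⟩
      · refine Or.inr ⟨by omega, hn1 ▸ hc1.symm, ?_⟩
        rw [hs2, hstable u (by omega)]
      · rw [hn1] at hs; exact absurd hs (by simp)

theorem pvExtX_insert (c c' : PySem.Dict (List Char) Int) (n : Nat) (s : List Char) (v : Int)
    (h : pvExtX c c' n s) : pvExtX c (c'.insert s v) n s := by
  intro u hus
  rw [PySem.Dict.get?_insert_of_ne c' v hus]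
  exact h u hus

theorem hajA_unfold (k : Nat) (s : List Char) (c : PySem.Dict (List Char) Int) (i : Int)
    (hget : c.get? s = none) (h1 : ¬ (s.length = 0 ∨ s.length = 1))
    (h2 : ¬ (s = "11".toList ∨ s = "00".toList)) (h3 : ¬ ((s.length : Int) - 1 ≤ i)) :
    hajACore (k + 1) s c i =
      (let r1 := hajACore k s c (i + 1)
       let r2 :=
         if PySem.List.pyGetD s i ' ' = PySem.List.pyGetD s (i + 1) ' ' then
           hajACore k (PySem.List.slice s (some 0) (some i) ++
                     PySem.List.slice s (some (i + 2)) (some (s.length : Int))) r1.2 0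
         else (0, r1.2)
       (r1.1 + r2.1, (r2.2).insert s (r1.1 + r2.1))) := by
  conv_lhs => rw [hajACore]
  simp only [hget]
  rw [if_neg h1, if_neg h2, if_neg h3]

theorem hajA_spec : ∀ (fuel : Nat) (s : List Char) (c : PySem.Dict (List Char) Int) (i : Int),
    muA s.length i < fuel → 0 ≤ i →
    (hajACore fuel s c i).1 = Aval c s i
    ∧ pvExtX c (hajACore fuel s c i).2 (s.length - 2) s
    ∧ (i = 0 → ((hajACore fuel s c i).2.get? s = c.get? s ∨
        (c.get? s = none ∧ (hajACore fuel s c i).2.get? s = some (Fv c s)))) := by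
  intro fuel
  induction fuel with
  | zero => intro s c i hmu _; exact absurd hmu (by omega)
  | succ k ih =>
    intro s c i hmu hi0
    rcases hg : c.get? s with _ | v
    · by_cases h1 : s.length = 0 ∨ s.length = 1
      · have he : hajACore (k + 1) s c i = (0, c) := by
          rw [hajACore]; simp only [hg]; rw [if_pos h1]
        rw [he]
        refine ⟨?_, fun u _ => Or.inl rfl, fun _ => Or.inl hg⟩
        simp only [Aval, hg]
        rw [if_pos (by omega)]
      · by_cases h2 : s = "11".toList ∨ s = "00".toList
        · have he : hajACore (k + 1) s c i = (1, c) := by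
            rw [hajACore]; simp only [hg]; rw [if_neg h1, if_pos h2]
          rw [he]
          refine ⟨?_, fun u _ => Or.inl rfl, fun _ => Or.inl hg⟩
          simp only [Aval, hg]
          rw [if_neg (by omega), if_pos h2]
        · by_cases h3 : (s.length : Int) - 1 ≤ i
          · have he : hajACore (k + 1) s c i = (0, c) := by
              rw [hajACore]; simp only [hg]; rw [if_neg h1, if_neg h2, if_pos h3]
            rw [he]
            refine ⟨?_, fun u _ => Or.inl rfl, fun _ => Or.inl hg⟩
            simp only [Aval, hg]
            rw [if_neg (by omega), if_neg h2, if_pos h3]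
          · -- computing branch
            have hlen : 2 ≤ s.length := by omega
            have hilt : i < (s.length : Int) - 1 := by omega
            have h1' : ¬ s.length ≤ 1 := by omega
            have hmu1 : muA s.length (i + 1) < k :=
              lt_of_lt_of_le (pvDecA_tail s.length i h1 h3) (by omega)
            obtain ⟨hv1, hX1, _⟩ := ih s c (i + 1) hmu1 (by omega)
            have hcut0 : PySem.List.slice s (some 0) (some i) ++
                PySem.List.slice s (some (i + 2)) (some (s.length : Int)) = remS s i.toNat :=
              cutA_eq s i hi0 hilt
            have hremlen : (remS s i.toNat).length = s.length - 2 :=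
              length_remS s i.toNat (by omega)
            have hmu2 : muA (remS s i.toNat).length 0 < k := by
              refine lt_of_lt_of_le (pvDecA_cut s.length _ i (by omega) ⟨?_, ?_⟩ h3) (by omega)
              · intro hneg; omega
              · intro _; omega
            obtain ⟨hv2, hX2, hz2⟩ := ih (remS s i.toNat) (hajACore k s c (i + 1)).2 0 hmu2 le_rfl
            rw [hajA_unfold k s c i hg h1 h2 h3, hcut0]
            simp only []
            have hv1' : (hajACore k s c (i + 1)).1 = Gv c s (i + 1).toNat := by
              rw [hv1]
              simp only [Aval, hg]
              rw [if_neg h1', if_neg h2]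
              split_ifs with hb
              · rw [G_stop c s (i + 1).toNat (by omega)]
              · rfl
            have hstep := G_step c s i.toNat (by omega)
            have hE1 : pvExt c (hajACore k s c (i + 1)).2 (s.length - 2) :=
              pvExt_of_pvExtX c _ _ s hX1 (by omega)
            by_cases hc : PySem.List.pyGetD s i ' ' = PySem.List.pyGetD s (i + 1) ' '
            · simp only [hc, if_true]
              set c1 := (hajACore k s c (i + 1)).2 with hc1def
              set r2 := hajACore k (remS s i.toNat) c1 0 with hr2def
              have hv2' : r2.1 = Fv c (remS s i.toNat) := by
                rw [hr2def, hv2, Aval_zero]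
                exact Fcore_stable c c1 (s.length - 2) hE1 (remS s i.toNat) none
                  (by simp [hremlen])
              have htest : s.getD i.toNat ' ' = s.getD (i.toNat + 1) ' ' := by
                rw [← pyGetD_toNat s i ' ' hi0, ← show (i + 1).toNat = i.toNat + 1 by omega,
                    ← pyGetD_toNat s (i + 1) ' ' (by omega)]
                exact hc
              have hval : (hajACore k s c (i + 1)).1 + r2.1 = Gv c s i.toNat := by
                rw [hstep, if_pos htest, hv1', hv2',
                    show (i + 1).toNat = i.toNat + 1 by omega]
                ring
              refine ⟨?_, ?_, ?_⟩
              · simp only [Aval, hg]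
                rw [if_neg h1', if_neg h2, if_neg h3]
                exact hval
              · apply pvExtX_insert
                exact comp_step c c1 r2.2 s (remS s i.toNat) (by omega) hX1
                  (by rw [hremlen] at hX2 ⊢; exact hX2) (hz2 rfl) hE1
              · intro hi
                subst hi
                refine Or.inr ⟨trivial, ?_⟩
                rw [PySem.Dict.get?_insert_self]
                rw [hval]
                rw [Fv_compute c s hg h1' h2]
                rfl
            · simp only [hc, if_false]
              have htest : ¬ s.getD i.toNat ' ' = s.getD (i.toNat + 1) ' ' := by
                rw [← pyGetD_toNat s i ' ' hi0, ← show (i + 1).toNat = i.toNat + 1 by omega,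
                    ← pyGetD_toNat s (i + 1) ' ' (by omega)]
                exact hc
              have hval : (hajACore k s c (i + 1)).1 + 0 = Gv c s i.toNat := by
                rw [hstep, if_neg htest, hv1', show (i + 1).toNat = i.toNat + 1 by omega]
                ring
              refine ⟨?_, ?_, ?_⟩
              · simp only [Aval, hg]
                rw [if_neg h1', if_neg h2, if_neg h3]
                exact hval
              · exact pvExtX_insert _ _ _ _ _ hX1
              · intro hi
                subst hi
                refine Or.inr ⟨trivial, ?_⟩
                rw [PySem.Dict.get?_insert_self, hval, Fv_compute c s hg h1' h2]
                rfl
    · have he : hajACore (k + 1) s c i = (v, c) := by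
        rw [hajACore]; simp only [hg]
      rw [he]
      exact ⟨by simp [Aval, hg], fun u _ => Or.inl rfl, fun _ => Or.inl hg⟩

theorem pvExt_of_pvExtAll (c c' : PySem.Dict (List Char) Int) (n : Nat)
    (h : pvExtAll c c' n) : pvExt c c' n := by
  intro u hu
  rcases h u with hc | ⟨_, h2, h3⟩
  · exact Or.inl hc
  · exact Or.inr ⟨h2, h3⟩

theorem pvExtAll_trans (c c1 c2 : PySem.Dict (List Char) Int) (n : Nat)
    (h1 : pvExtAll c c1 n) (h2 : pvExtAll c1 c2 n) : pvExtAll c c2 n := by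
  intro u
  rcases h2 u with hc | ⟨hb, hn1, hs2⟩
  · rcases h1 u with hc1 | ⟨hb, hn, hs⟩
    · exact Or.inl (hc.trans hc1)
    · exact Or.inr ⟨hb, hn, hc.trans hs⟩
  · rcases h1 u with hc1 | ⟨_, _, hs⟩
    · refine Or.inr ⟨hb, hn1 ▸ hc1.symm, ?_⟩
      rw [hs2]
      congr 1
      exact Fcore_stable c c1 n (pvExt_of_pvExtAll c c1 n h1) u none (by simpa using hb)
    · rw [hn1] at hs; exact absurd hs (by simp)

-- combine a pvExtX step (one hajB call) into a running pvExtAll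
theorem pvExtAll_step (c c1 c2 : PySem.Dict (List Char) Int) (n : Nat) (e : List Char)
    (h1 : pvExtAll c c1 n) (he : e.length ≤ n)
    (hX : pvExtX c1 c2 (e.length - 2) e)
    (hz : c2.get? e = c1.get? e ∨ (c1.get? e = none ∧ c2.get? e = some (Fv c1 e))) :
    pvExtAll c c2 n := by
  refine pvExtAll_trans c c1 c2 n h1 ?_
  intro u
  by_cases hu : u = e
  · subst hu
    rcases hz with h' | ⟨hn, hs⟩
    · exact Or.inl h'
    · exact Or.inr ⟨he, hn, hs⟩
  · rcases hX u hu with h' | ⟨hb, hn, hs⟩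
    · exact Or.inl h'
    · exact Or.inr ⟨by omega, hn, hs⟩

-- position pre.length + k of pre ++ l reads l at k
theorem pvGetDMid (pre l : List Char) (k : Nat) (d : Char) :
    (pre ++ l).getD (pre.length + k) d = l.getD k d := by
  unfold List.getD
  rw [List.getElem?_append_right (Nat.le_add_right _ _), Nat.add_sub_cancel_left]

-- removing the pair at position pre.length from pre ++ a :: b :: rest leaves pre ++ rest
theorem pvRemMid (pre : List Char) (a b : Char) (rest : List Char) :
    remS (pre ++ a :: b :: rest) pre.length = pre ++ rest := by
  unfold remS
  rw [List.take_left, List.drop_length_add_append]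
  rfl

theorem hajB_unfold (k : Nat) (s : List Char) (c : PySem.Dict (List Char) Int) (i : Int)
    (hget : c.get? s = none) (h1 : ¬ s.length ≤ 1)
    (h2 : ¬ (s = "11".toList ∨ s = "00".toList)) (h3 : ¬ ((s.length : Int) - 1 ≤ i)) :
    hajBCore (k + 1) s c i =
      (let r := scanB k (PySem.List.slice s none (some i)) (PySem.List.slice s (some i) none) c
       (r.1, (r.2).insert s r.1)) := by
  conv_lhs => rw [hajBCore]
  simp only [hget]
  rw [if_neg h1, if_neg h2, if_neg h3]

theorem hajB_scan_spec : ∀ (fuel : Nat),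
    (∀ (s : List Char) (c : PySem.Dict (List Char) Int) (i : Int),
      s.length * (s.length + 2) + s.length + 1 < fuel → 0 ≤ i →
      (hajBCore fuel s c i).1 = Aval c s i
      ∧ pvExtX c (hajBCore fuel s c i).2 (s.length - 2) s
      ∧ (i = 0 → ((hajBCore fuel s c i).2.get? s = c.get? s ∨
          (c.get? s = none ∧ (hajBCore fuel s c i).2.get? s = some (Fv c s)))))
    ∧ (∀ (pre suf : List Char) (c : PySem.Dict (List Char) Int),
      (pre.length + suf.length) * (pre.length + suf.length + 2) + suf.length < fuel →
      (scanB fuel pre suf c).1 = Gv c (pre ++ suf) pre.length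
      ∧ pvExtAll c (scanB fuel pre suf c).2 ((pre ++ suf).length - 2)) := by
  intro fuel
  induction fuel with
  | zero =>
    constructor
    · intro s c i hmu _; exact absurd hmu (by omega)
    · intro pre suf c hmu; exact absurd hmu (by omega)
  | succ k ih =>
    constructor
    · -- hajBCore
      intro s c i hmu hi0
      rcases hg : c.get? s with _ | v
      · by_cases h1 : s.length ≤ 1
        · have he : hajBCore (k + 1) s c i = (0, c) := by
            rw [hajBCore]; simp only [hg]; rw [if_pos h1]
          rw [he]
          refine ⟨?_, fun u _ => Or.inl rfl, fun _ => Or.inl hg⟩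
          simp only [Aval, hg]
          rw [if_pos h1]
        · by_cases h2 : s = "11".toList ∨ s = "00".toList
          · have he : hajBCore (k + 1) s c i = (1, c) := by
              rw [hajBCore]; simp only [hg]; rw [if_neg h1, if_pos h2]
            rw [he]
            refine ⟨?_, fun u _ => Or.inl rfl, fun _ => Or.inl hg⟩
            simp only [Aval, hg]
            rw [if_neg h1, if_pos h2]
          · by_cases h3 : (s.length : Int) - 1 ≤ i
            · have he : hajBCore (k + 1) s c i = (0, c) := by
                rw [hajBCore]; simp only [hg]; rw [if_neg h1, if_neg h2, if_pos h3]
              rw [he]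
              refine ⟨?_, fun u _ => Or.inl rfl, fun _ => Or.inl hg⟩
              simp only [Aval, hg]
              rw [if_neg h1, if_neg h2, if_pos h3]
            · -- computing branch: split at i, scan, store the total
              have hmus : ((PySem.List.slice s none (some i)).length +
                  (PySem.List.slice s (some i) none).length) *
                  ((PySem.List.slice s none (some i)).length +
                  (PySem.List.slice s (some i) none).length + 2) +
                  (PySem.List.slice s (some i) none).length < k :=
                lt_of_lt_of_le (pvDecB_enter s i) (by omega)
              obtain ⟨hval, hAll⟩ :=
                ih.2 (PySem.List.slice s none (some i)) (PySem.List.slice s (some i) none) c hmus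
              have hsplit : PySem.List.slice s none (some i) ++
                  PySem.List.slice s (some i) none = s := by
                rw [PySem.List.slice_to s hi0, PySem.List.slice_from s hi0]
                exact List.take_append_drop _ _
              have hplen : (PySem.List.slice s none (some i)).length = i.toNat := by
                rw [PySem.List.slice_to s hi0]
                simp
                omega
              rw [hsplit] at hval hAll
              rw [hplen] at hval
              rw [hajB_unfold k s c i hg h1 h2 h3]
              refine ⟨?_, ?_, ?_⟩
              · simp only [Aval, hg]
                rw [if_neg h1, if_neg h2, if_neg h3]
                exact hval
              · apply pvExtX_insert
                intro u hus
                rcases hAll u with hc | ⟨hb, hn, hs⟩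
                · exact Or.inl hc
                · exact Or.inr ⟨hb, hn, hs⟩
              · intro hi
                subst hi
                refine Or.inr ⟨rfl, ?_⟩
                simp only [PySem.Dict.get?_insert_self]
                rw [hval, show ((0:Int)).toNat = 0 from rfl, Fv_compute c s hg h1 h2]
      · have he : hajBCore (k + 1) s c i = (v, c) := by
          rw [hajBCore]; simp only [hg]
        rw [he]
        exact ⟨by simp [Aval, hg], fun u _ => Or.inl rfl, fun _ => Or.inl hg⟩
    · -- scanB
      intro pre suf c hmu
      match suf with
      | [] =>
        have he : scanB (k + 1) pre [] c = (0, c) := by rw [scanB]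
        rw [he]
        refine ⟨?_, fun u => Or.inl rfl⟩
        rw [G_stop c (pre ++ []) pre.length (by simp)]
      | [x] =>
        have he : scanB (k + 1) pre [x] c = (0, c) := by rw [scanB]
        rw [he]
        refine ⟨?_, fun u => Or.inl rfl⟩
        rw [G_stop c (pre ++ [x]) pre.length (by simp)]
      | a :: b :: rest =>
        have hmu1 : ((pre ++ [a]).length + (b :: rest).length) *
            ((pre ++ [a]).length + (b :: rest).length + 2) + (b :: rest).length < k :=
          lt_of_lt_of_le (pvDecB_scan pre a b rest) (by omega)
        obtain ⟨hv1, hAll1⟩ := ih.2 (pre ++ [a]) (b :: rest) c hmu1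
        have hassoc : (pre ++ [a]) ++ b :: rest = pre ++ a :: b :: rest := by simp
        rw [hassoc] at hv1 hAll1
        have hplen1 : (pre ++ [a]).length = pre.length + 1 := by simp
        rw [hplen1] at hv1
        by_cases hab : a = b
        · subst hab
          have hmu2 : (pre ++ rest).length * ((pre ++ rest).length + 2) +
              (pre ++ rest).length + 1 < k :=
            lt_of_lt_of_le (pvDecB_cut pre a a rest) (by omega)
          obtain ⟨hv2, hX2, hz2⟩ := ih.1 (pre ++ rest) (scanB k (pre ++ [a]) (a :: rest) c).2 0 hmu2 le_rfl
          have hchild : (pre ++ rest).length = (pre ++ a :: a :: rest).length - 2 := by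
            simp
            omega
          have he : scanB (k + 1) pre (a :: a :: rest) c =
              ((scanB k (pre ++ [a]) (a :: rest) c).1 +
                 (hajBCore k (pre ++ rest) (scanB k (pre ++ [a]) (a :: rest) c).2 0).1,
               (hajBCore k (pre ++ rest) (scanB k (pre ++ [a]) (a :: rest) c).2 0).2) := by
            rw [scanB]
            simp
          rw [he]
          set c1 := (scanB k (pre ++ [a]) (a :: rest) c).2 with hc1
          set r2 := hajBCore k (pre ++ rest) c1 0 with hr2
          have hE1 : pvExt c c1 ((pre ++ a :: a :: rest).length - 2) :=
            pvExt_of_pvExtAll _ _ _ hAll1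
          have hv2' : r2.1 = Fv c (pre ++ rest) := by
            rw [hr2, hv2, Aval_zero]
            exact Fcore_stable c c1 _ hE1 (pre ++ rest) none (by simpa using le_of_eq hchild)
          refine ⟨?_, ?_⟩
          · rw [G_step c (pre ++ a :: a :: rest) pre.length (by simp)]
            have hga : (pre ++ a :: a :: rest).getD pre.length ' ' = a := by
              have := pvGetDMid pre (a :: a :: rest) 0 ' '
              simpa using this
            have hgb : (pre ++ a :: a :: rest).getD (pre.length + 1) ' ' = a := by
              have := pvGetDMid pre (a :: a :: rest) 1 ' '
              simpa using this
            rw [hga, hgb, if_pos rfl, pvRemMid pre a a rest, hv1, hv2']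
            ring
          · exact pvExtAll_step c c1 r2.2 _ (pre ++ rest) hAll1 (le_of_eq hchild) hX2 (hz2 rfl)
        · have he : scanB (k + 1) pre (a :: b :: rest) c = scanB k (pre ++ [a]) (b :: rest) c := by
            rw [scanB]
            simp [hab]
          rw [he]
          refine ⟨?_, hAll1⟩
          rw [G_step c (pre ++ a :: b :: rest) pre.length (by simp)]
          have hga : (pre ++ a :: b :: rest).getD pre.length ' ' = a := by
            have := pvGetDMid pre (a :: b :: rest) 0 ' '
            simpa using this
          have hgb : (pre ++ a :: b :: rest).getD (pre.length + 1) ' ' = b := by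
            have := pvGetDMid pre (a :: b :: rest) 1 ' '
            simpa using this
          rw [hga, hgb, if_neg hab, hv1]
          ring

-- the three early-return disjuncts of Pre_ give literally equal first steps
theorem early_eq (ka kb : Nat) (s : List Char) (c : PySem.Dict (List Char) Int) (i : Int)
    (h : s.length ≤ 1 ∨ s = "11".toList ∨ s = "00".toList ∨ (c.get? s).isSome) :
    (hajACore (ka + 1) s c i).1 = (hajBCore (kb + 1) s c i).1 := by
  rcases hg : c.get? s with _ | v
  · rw [hajACore, hajBCore]
    simp only [hg]
    rcases h with h | h | h | h
    · rw [if_pos (show s.length = 0 ∨ s.length = 1 by omega), if_pos h]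
    · subst h
      rw [if_neg (by decide), if_pos (Or.inl rfl), if_neg (by decide), if_pos (Or.inl rfl)]
    · subst h
      rw [if_neg (by decide), if_pos (Or.inr rfl), if_neg (by decide), if_pos (Or.inr rfl)]
    · rw [hg] at h
      simp at h
  · rw [hajACore, hajBCore]
    simp only [hg]

-- ===== VERDICT (by name: the statement is the Claim_ definition above) =====
theorem hajotus_spec : Claim_equal_hajotus := by
  intro s cache indeksi _ hpre
  unfold Spec_hajotus
  unfold hajotus hajotus_alt
  rcases hpre with h | h | h | h | h
  · rw [(hajA_spec (muA s.toList.length indeksi + 1) s.toList (mkCache cache) indeksi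
          (Nat.lt_succ_self _) h).1,
        ((hajB_scan_spec (s.toList.length * (s.toList.length + 2) + s.toList.length + 2)).1
          s.toList (mkCache cache) indeksi (Nat.lt_succ_self _) h).1]
  · exact early_eq _ _ _ _ _ (Or.inl h)
  · exact early_eq _ _ _ _ _ (Or.inr (Or.inl (by rw [h])))
  · exact early_eq _ _ _ _ _ (Or.inr (Or.inr (Or.inl (by rw [h]))))
  · refine early_eq _ _ _ _ _ (Or.inr (Or.inr (Or.inr ?_)))
    have : ((PySem.Dict.ofList (cache.map (fun p => (p.1.toList, p.2)))).get? s.toList).isSome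
        = true ↔ s.toList ∈ (cache.map (fun p => (p.1.toList, p.2))).map Prod.fst := by
      rw [← PySem.Dict.contains_eq_isSome_get?, PySem.Dict.contains_iff_mem_keys]
      have hk : (PySem.Dict.ofList (cache.map (fun p => (p.1.toList, p.2)))).keys
          = PySem.Set.update (PySem.Dict.empty (ν := Int)).keys
              ((cache.map (fun p => (p.1.toList, p.2))).map Prod.fst) := by
        simpa [PySem.Dict.ofList, PySem.Dict.update] using
          PySem.Dict.keys_foldl_insert_key (cache.map (fun p => (p.1.toList, p.2)))
            Prod.fst (fun _ p => p.2) PySem.Dict.empty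
      rw [hk]
      simp [PySem.Set.mem_update, PySem.Dict.keys_empty]
    unfold mkCache
    rw [this]
    simp only [List.map_map, List.mem_map] at h ⊢
    rcases h with ⟨p, hp, hps⟩
    exact ⟨p, hp, by simp [Function.comp, hps]⟩
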